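-- pv_equiv track=rewrite | github.com/DongRang123/dfs_basic | 2383_dp.py | process_stair
-- ===== SOURCE A (Python) =====
-- def process_stair(persons, stair):
--     # persons: 해당 계단으로 배정된 사람들의 (x,y)
--     # stair: (x, y, 길이)
--     arrivals = []
--     for p in persons:
--         # 이동시간 = 맨해튼 거리, 도착 후 1분 대기 필요
--         arrivals.append(abs(p[0]-stair[0]) + abs(p[1]-stair[1]) + 1)
--     arrivals.sort()
--     finish = [0] * len(arrivals)
--     for i in range(len(arrivals)):
--         if i < 3:
--             finish[i] = arrivals[i] + stair[2]
--         else: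
--             finish[i] = max(arrivals[i], finish[i-3]) + stair[2]
--     return finish[-1] if finish else 0
-- ===== SOURCE B (Python) =====
-- def process_stair(persons, stair):
--     # Closed form instead of the DP array: unrolling finish[i] = max(arr[i], finish[i-3]) + length
--     # shows the answer is max over j = n-1, n-4, n-7, ... of arr[j] + ((n-1-j)//3 + 1)*length,
--     # so compute that max directly with a backward stride-3 scan over the sorted arrivals.
--     sx, sy, length = stair
--     arr = sorted(abs(x - sx) + abs(y - sy) + 1 for x, y in persons)
--     if not arr:
--         return 0
--     n = len(arr)
--     j = n - 1
--     best = arr[j] + length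
--     while j >= 3:
--         j -= 3
--         cand = arr[j] + ((n - 1 - j) // 3 + 1) * length
--         if best < cand:
--             best = cand
--     return best
-- ===== Notes on version B (the rewrite author's own statement) =====
-- stated objective: alternative
-- what changed: Replaces A's forward DP over a finish[] array by the closed form obtained from unrolling the recurrence: the answer is the max of arr[j] + ((n-1-j)//3 + 1)*length over the backward stride-3 chain j = n-1, n-4, ..., computed by a single backward scan without any finish array.
import Mathlib
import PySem

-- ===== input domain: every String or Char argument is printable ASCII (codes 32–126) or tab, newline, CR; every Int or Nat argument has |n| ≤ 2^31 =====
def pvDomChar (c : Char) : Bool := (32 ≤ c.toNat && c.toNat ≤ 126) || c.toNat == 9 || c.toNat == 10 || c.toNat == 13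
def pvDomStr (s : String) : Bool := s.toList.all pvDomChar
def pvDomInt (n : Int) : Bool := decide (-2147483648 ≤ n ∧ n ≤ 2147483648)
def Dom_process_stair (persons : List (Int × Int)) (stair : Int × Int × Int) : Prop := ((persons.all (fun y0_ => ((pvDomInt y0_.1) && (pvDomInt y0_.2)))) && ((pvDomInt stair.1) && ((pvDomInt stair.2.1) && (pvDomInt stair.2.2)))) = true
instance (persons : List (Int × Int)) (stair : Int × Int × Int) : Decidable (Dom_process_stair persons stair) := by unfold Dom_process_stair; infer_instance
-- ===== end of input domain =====

-- B replaces A's forward DP over a finish[] array by the closed form from unrolling the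
-- recurrence: a backward stride-3 scan maximising arr[j] + ((n-1-j)/3 + 1)*length.

-- ===== PORT A =====
def process_stair (persons : List (Int × Int)) (stair : Int × Int × Int) : Int :=
  -- arrivals accumulated by append, as in the Python loop
  let arrivals := persons.foldl (fun acc p => acc ++ [|p.1 - stair.1| + |p.2 - stair.2.1| + 1]) []
  let arrivals := PySem.List.sorted arrivals (fun x => x) false
  let n := arrivals.length
  let finish := List.replicate n (0 : Int)
  let finish := (List.range n).foldl (fun fin i =>
      if i < 3 then fin.set i (arrivals.getD i 0 + stair.2.2)
      else fin.set i (max (arrivals.getD i 0) (fin.getD (i - 3) 0) + stair.2.2)) finish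
  if finish.isEmpty then 0 else finish.getD (finish.length - 1) 0

-- ===== PORT B =====
-- B's while loop: j steps down by 3; cand's `//` is on n-1-j ≥ 0, ported exactly as Nat division
def chainB (s : List Int) (L : Int) (n : ℕ) : ℕ → Int → Int
  | j, best =>
    if _h : 3 ≤ j then
      let j' := j - 3
      let cand := s.getD j' 0 + ((((n - 1 - j') / 3 : ℕ) : ℤ) + 1) * L
      chainB s L n j' (if best < cand then cand else best)
    else best
decreasing_by omega

def process_stair_alt (persons : List (Int × Int)) (stair : Int × Int × Int) : Int :=
  let s := PySem.List.sorted (persons.map (fun p => |p.1 - stair.1| + |p.2 - stair.2.1| + 1)) (fun x => x) false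
  if s.isEmpty then 0
  else
    let n := s.length
    chainB s stair.2.2 n (n - 1) (s.getD (n - 1) 0 + stair.2.2)

-- ===== PRECONDITION & SPEC =====
def Spec_process_stair (persons : List (Int × Int)) (stair : Int × Int × Int) (out : Int) : Prop := out = process_stair_alt persons stair
instance (persons : List (Int × Int)) (stair : Int × Int × Int) (out : Int) : Decidable (Spec_process_stair persons stair out) := by unfold Spec_process_stair; infer_instance

-- ===== CLAIM (what is proved, stated in full; the proofs are below) =====
def Claim_equal_process_stair : Prop := ∀ (persons : List (Int × Int)) (stair : Int × Int × Int), Dom_process_stair persons stair → Spec_process_stair persons stair (process_stair persons stair)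

-- ===== LEMMAS AND PROOFS =====

-- the recurrence A's DP computes: finish time of the i-th (sorted) person
def fsp (arr : List Int) (L : Int) (i : ℕ) : Int :=
  (if _h : i < 3 then arr.getD i 0 else max (arr.getD i 0) (fsp arr L (i - 3))) + L
decreasing_by omega

-- fsp shifted to the multiplier frame of B's scan
def Fm (s : List Int) (L : Int) (n j : ℕ) : Int :=
  fsp s L j + (((n - 1 - j) / 3 : ℕ) : ℤ) * L

lemma foldl_append_map (g : Int × Int → Int) :
    ∀ (l : List (Int × Int)) (acc : List Int),
      l.foldl (fun acc p => acc ++ [g p]) acc = acc ++ l.map g := by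
  intro l
  induction l with
  | nil => simp
  | cons p t ih => intro acc; simp [List.foldl, ih]

lemma getD_map_range (n j : ℕ) (g : ℕ → Int) (d : Int) :
    ((List.range n).map g).getD j d = if j < n then g j else d := by
  by_cases h : j < n
  · rw [List.getD_eq_getElem _ _ (by simpa using h)]
    simp [h]
  · rw [List.getD_eq_default _ _ (by simpa using h)]
    simp [h]

lemma set_map_range (n k : ℕ) (g : ℕ → Int) (v : Int) :
    ((List.range n).map g).set k v
      = (List.range n).map (fun j => if j = k then v else g j) := by
  apply List.ext_getElem
  · simp
  · intro i h1 h2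
    simp only [List.getElem_set, List.getElem_map, List.getElem_range]
    split_ifs <;> first | rfl | omega

-- invariant of A's indexed loop over the finish array
lemma loopA_inv (s : List Int) (L : Int) :
    ∀ k, k ≤ s.length →
      (List.range k).foldl (fun fin i =>
          if i < 3 then fin.set i (s.getD i 0 + L)
          else fin.set i (max (s.getD i 0) (fin.getD (i - 3) 0) + L))
        (List.replicate s.length (0 : Int))
      = (List.range s.length).map (fun j => if j < k then fsp s L j else 0) := by
  intro k
  induction k with
  | zero =>
    intro _
    apply List.ext_getElem
    · simp
    · intro i h1 h2; simp
  | succ k ih =>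
    intro hk
    rw [List.range_succ, List.foldl_append, ih (by omega)]
    simp only [List.foldl_cons, List.foldl_nil]
    have hcongr : ∀ j ∈ List.range s.length,
        (if j = k then fsp s L k else if j < k then fsp s L j else 0)
          = if j < k + 1 then fsp s L j else 0 := by
      intro j _
      rcases Nat.lt_trichotomy j k with h | h | h
      · rw [if_neg (by omega), if_pos h, if_pos (by omega)]
      · subst h; rw [if_pos rfl, if_pos (by omega)]
      · rw [if_neg (by omega), if_neg (by omega), if_neg (by omega)]
    have htarget : ((List.range s.length).map fun j => if j < k then fsp s L j else 0).set k (fsp s L k)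
        = (List.range s.length).map (fun j => if j < k + 1 then fsp s L j else 0) := by
      rw [set_map_range]; exact List.map_congr_left hcongr
    by_cases h3 : k < 3
    · rw [if_pos h3, ← htarget]
      congr 1
      conv_rhs => rw [fsp]
      rw [dif_pos h3]
    · have hread : ((List.range s.length).map fun j => if j < k then fsp s L j else 0).getD (k - 3) 0
          = fsp s L (k - 3) := by
        rw [getD_map_range, if_pos (by omega), if_pos (by omega)]
      rw [if_neg h3, ← htarget]
      congr 1
      rw [hread]
      conv_rhs => rw [fsp]
      rw [dif_neg h3]

-- unrolling Fm one chain step: for 3 ≤ j ≤ n-1, Fm n j = max cand(j) (Fm n (j-3)),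
-- where cand(j) is exactly B's candidate value
lemma Fm_step (s : List Int) (L : Int) (n j : ℕ) (h3 : 3 ≤ j) (hj : j ≤ n - 1) :
    Fm s L n j = max (s.getD j 0 + ((((n - 1 - j) / 3 : ℕ) : ℤ) + 1) * L) (Fm s L n (j - 3)) := by
  have hdiv : ((n - 1 - (j - 3)) / 3 : ℕ) = (n - 1 - j) / 3 + 1 := by
    have : n - 1 - (j - 3) = (n - 1 - j) + 3 := by omega
    rw [this]
    omega
  unfold Fm
  conv_lhs => rw [fsp]
  rw [dif_neg (by omega), hdiv]
  push_cast
  rw [add_assoc, ← max_add_add_right]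
  ring_nf

-- base case: for j < 3, Fm n j is exactly B's candidate at j
lemma Fm_base (s : List Int) (L : Int) (n j : ℕ) (h3 : j < 3) :
    Fm s L n j = s.getD j 0 + ((((n - 1 - j) / 3 : ℕ) : ℤ) + 1) * L := by
  unfold Fm
  conv_lhs => rw [fsp]
  rw [dif_pos h3]
  ring

-- invariant of B's backward scan
lemma chainB_eq (s : List Int) (L : Int) (n : ℕ) :
    ∀ j, j ≤ n - 1 → ∀ b : Int,
      chainB s L n j b = if 3 ≤ j then max b (Fm s L n (j - 3)) else b := by
  intro j
  induction j using Nat.strong_induction_on with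
  | _ j ih =>
    intro hj b
    by_cases h3 : 3 ≤ j
    · rw [chainB, dif_pos h3, if_pos h3,
        ih (j - 3) (by omega) (by omega)]
      by_cases h6 : 3 ≤ j - 3
      · rw [if_pos h6, Fm_step s L n (j - 3) h6 (by omega)]
        have : (if b < s.getD (j - 3) 0 + ((((n - 1 - (j - 3)) / 3 : ℕ) : ℤ) + 1) * L
            then s.getD (j - 3) 0 + ((((n - 1 - (j - 3)) / 3 : ℕ) : ℤ) + 1) * L else b)
            = max b (s.getD (j - 3) 0 + ((((n - 1 - (j - 3)) / 3 : ℕ) : ℤ) + 1) * L) := by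
          rw [max_def]; split_ifs <;> omega
        rw [this, max_assoc]
      · rw [if_neg h6, Fm_base s L n (j - 3) (by omega), max_def]
        split_ifs <;> omega
    · rw [chainB, dif_neg h3, if_neg h3]

-- ===== VERDICT (by name: the statement is the Claim_ definition above) =====
theorem process_stair_spec : Claim_equal_process_stair := by
  intro persons stair _
  show process_stair persons stair = process_stair_alt persons stair
  simp only [process_stair, process_stair_alt]
  rw [foldl_append_map (fun p => |p.1 - stair.1| + |p.2 - stair.2.1| + 1) persons [],
    List.nil_append]
  set s := PySem.List.sorted (persons.map (fun p => |p.1 - stair.1| + |p.2 - stair.2.1| + 1)) (fun x => x) false with hs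
  set L := stair.2.2 with hL
  rw [loopA_inv s L s.length (le_refl _)]
  by_cases hs0 : s = []
  · rw [hs0]; simp
  · have hlen : 0 < s.length := List.length_pos_iff.mpr hs0
    have hne : ¬ ((List.range s.length).map fun j => if j < s.length then fsp s L j else 0).isEmpty = true := by
      simp only [List.isEmpty_iff, List.map_eq_nil_iff, List.range_eq_nil]
      omega
    have hne' : ¬ s.isEmpty = true := by
      simp only [List.isEmpty_iff]; exact hs0
    rw [if_neg hne, if_neg hne', List.length_map, List.length_range, getD_map_range,
      if_pos (by omega)]
    rw [chainB_eq s L s.length (s.length - 1) (le_refl _)]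
    have hFm : fsp s L (s.length - 1) = Fm s L s.length (s.length - 1) := by
      unfold Fm
      rw [show s.length - 1 - (s.length - 1) = 0 by omega]
      simp
    by_cases h3 : 3 ≤ s.length - 1
    · rw [if_pos h3, hFm, Fm_step s L s.length (s.length - 1) h3 (le_refl _)]
      rw [show s.length - 1 - (s.length - 1) = 0 by omega]
      norm_num
      intro h; exact absurd h hs0
    · rw [if_neg h3, hFm, Fm_base s L s.length (s.length - 1) (by omega)]
      rw [show s.length - 1 - (s.length - 1) = 0 by omega]
      norm_num
      intro h; exact absurd h hs0
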